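-- pv_equiv track=rewrite | github.com/pilancilab/flash-sketch-paper | export_abstract_md.py | unescape_latex
-- ===== SOURCE A (Python) =====
-- def unescape_latex(text: str) -> str:
--     """Convert common LaTeX escapes to literal characters."""
--     replacements = {
--         r"\%": "%",
--         r"\&": "&",
--         r"\_": "_",
--         r"\#": "#",
--         r"\$": "$",
--         r"\{": "{",
--         r"\}": "}",
--     }
--     for latex, value in replacements.items():
--         text = text.replace(latex, value)
--     return text
-- ===== SOURCE B (Python) =====
-- _ESCAPABLE = frozenset("%&_#${}")
--
--
-- def unescape_latex(text: str) -> str: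
--     """Convert common LaTeX escapes to literal characters (single scan)."""
--     out = []
--     i = 0
--     n = len(text)
--     while i < n:
--         ch = text[i]
--         if ch == "\\" and i + 1 < n and text[i + 1] in _ESCAPABLE:
--             out.append(text[i + 1])
--             i += 2
--         else:
--             out.append(ch)
--             i += 1
--     return "".join(out)
-- ===== Notes on version B (the rewrite author's own statement) =====
-- stated objective: alternative
-- what changed: Seven sequential full-string str.replace passes are replaced by one explicit left-to-right character scan that strips the backslash of an escape when the next character is escapable and copies every other character.
import Mathlib
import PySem

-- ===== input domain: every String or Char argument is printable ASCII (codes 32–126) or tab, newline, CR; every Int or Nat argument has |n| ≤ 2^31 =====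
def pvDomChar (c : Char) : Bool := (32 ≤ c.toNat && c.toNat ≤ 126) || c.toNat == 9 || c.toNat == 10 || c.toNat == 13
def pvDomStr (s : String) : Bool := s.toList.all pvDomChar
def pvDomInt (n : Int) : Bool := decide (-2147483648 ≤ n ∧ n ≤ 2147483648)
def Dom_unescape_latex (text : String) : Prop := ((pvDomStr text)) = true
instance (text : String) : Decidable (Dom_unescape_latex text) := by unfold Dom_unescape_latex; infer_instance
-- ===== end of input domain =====

-- B replaces A's seven sequential str.replace passes by one left-to-right character scan; same result, one pass.

-- ===== PORT A =====
def unescape_latex (text : String) : String :=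
  -- for latex, value in replacements.items(): text = text.replace(latex, value)
  let text := PySem.Str.replace text "\\%" "%"
  let text := PySem.Str.replace text "\\&" "&"
  let text := PySem.Str.replace text "\\_" "_"
  let text := PySem.Str.replace text "\\#" "#"
  let text := PySem.Str.replace text "\\$" "$"
  let text := PySem.Str.replace text "\\{" "{"
  let text := PySem.Str.replace text "\\}" "}"
  text

-- ===== PORT B =====
-- the while-loop of Source B: emit text[i+1] and skip two on an escape, else emit text[i] and advance one
def scanEsc (es : List Char) : List Char → List Char
  | [] => []
  | [a] => [a]
  | a :: b :: t => if a = '\\' ∧ b ∈ es then b :: scanEsc es t else a :: scanEsc es (b :: t)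

def escList : List Char := ['%', '&', '_', '#', '$', '{', '}']

def unescape_latex_alt (text : String) : String :=
  String.ofList (scanEsc escList text.toList)

-- ===== PRECONDITION & SPEC =====
def Spec_unescape_latex (text : String) (out : String) : Prop := out = unescape_latex_alt text
instance (text : String) (out : String) : Decidable (Spec_unescape_latex text out) := by unfold Spec_unescape_latex; infer_instance

-- ===== CLAIM (what is proved, stated in full; the proofs are below) =====
def Claim_equal_unescape_latex : Prop := ∀ (text : String), Dom_unescape_latex text → Spec_unescape_latex text (unescape_latex text)

-- ===== LEMMAS AND PROOFS =====

-- one replace pass "\\c" -> "c", as a structural scan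
def rep1 (c : Char) : List Char → List Char
  | [] => []
  | [a] => [a]
  | a :: b :: t => if a = '\\' ∧ b = c then c :: rep1 c t else a :: rep1 c (b :: t)

lemma rep1_cons_ne (c a : Char) (t : List Char) (h : a ≠ '\\') :
    rep1 c (a :: t) = a :: rep1 c t := by
  cases t with
  | nil => simp [rep1]
  | cons d r => simp [rep1, h]

lemma scanEsc_cons_ne (es : List Char) (a : Char) (t : List Char) (h : a ≠ '\\') :
    scanEsc es (a :: t) = a :: scanEsc es t := by
  cases t with
  | nil => simp [scanEsc]
  | cons d r => simp [scanEsc, h]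

lemma go_eq_rep1 (c : Char) :
    ∀ (fuel : Nat) (l acc : List Char), l.length ≤ fuel →
      PySem.Chars.replace.go ['\\', c] [c] fuel l acc = acc.reverse ++ rep1 c l := by
  intro fuel
  induction fuel with
  | zero =>
    intro l acc hl
    have : l = [] := List.eq_nil_of_length_eq_zero (Nat.le_zero.mp hl)
    subst this
    simp [PySem.Chars.replace.go, rep1]
  | succ n ih =>
    intro l acc hl
    cases l with
    | nil => simp [PySem.Chars.replace.go, rep1]
    | cons h t =>
      by_cases hp : List.isPrefixOf ['\\', c] (h :: t) = true
      · cases t with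
        | nil => simp [List.isPrefixOf] at hp
        | cons d r =>
          have hp' := hp
          simp [List.isPrefixOf] at hp'
          obtain ⟨h1, h2⟩ := hp'
          subst h1; subst h2
          have hr : r.length ≤ n := by simp at hl; omega
          simp only [PySem.Chars.replace.go]
          rw [if_pos hp]
          rw [show List.drop (['\\', c] : List Char).length ('\\' :: c :: r) = r from rfl]
          rw [ih r _ hr]
          simp [rep1]
      · cases t with
        | nil =>
          simp only [PySem.Chars.replace.go]
          rw [if_neg hp]
          rw [ih [] _ (Nat.zero_le n)]
          simp [rep1]
        | cons d r =>
          have hdr : (d :: r).length ≤ n := by simp at hl ⊢; omega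
          simp only [PySem.Chars.replace.go]
          rw [if_neg hp]
          rw [ih (d :: r) _ hdr]
          have hnc : ¬ (h = '\\' ∧ d = c) := by
            intro ⟨e1, e2⟩; subst e1; subst e2; simp [List.isPrefixOf] at hp
          simp [rep1, hnc]

lemma replace_eq_rep1 (c : Char) (l : List Char) :
    PySem.Chars.replace l ['\\', c] [c] = rep1 c l := by
  have he : (['\\', c] : List Char).isEmpty = false := rfl
  simp only [PySem.Chars.replace, he, Bool.false_eq_true, if_false]
  exact go_eq_rep1 c l.length l [] le_rfl

-- the key commutation: a replace pass before a scan equals the scan with the character added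
lemma scan_rep1 (c : Char) (es : List Char) (hc : c ≠ '\\') (hces : c ∉ es) (hes : '\\' ∉ es) :
    ∀ l : List Char, scanEsc es (rep1 c l) = scanEsc (c :: es) l := by
  have H : ∀ n, ∀ l : List Char, l.length ≤ n → scanEsc es (rep1 c l) = scanEsc (c :: es) l := by
    intro n
    induction n with
    | zero =>
      intro l hl
      have : l = [] := List.eq_nil_of_length_eq_zero (Nat.le_zero.mp hl)
      subst this; simp [rep1, scanEsc]
    | succ n ih =>
      intro l hl
      match l with
      | [] => simp [rep1, scanEsc]
      | [a] => simp [rep1, scanEsc]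
      | a :: b :: t =>
        have hlt : t.length ≤ n := by simp at hl; omega
        have hlbt : (b :: t).length ≤ n := by simp at hl ⊢; omega
        by_cases hab : a = '\\' ∧ b = c
        · obtain ⟨ha, hb⟩ := hab
          rw [show rep1 c (a :: b :: t) = c :: rep1 c t from by simp [rep1, ha, hb]]
          rw [scanEsc_cons_ne es c _ hc, ih t hlt]
          simp [scanEsc, ha, hb]
        · rw [show rep1 c (a :: b :: t) = a :: rep1 c (b :: t) from by simp [rep1, hab]]
          by_cases ha : a = '\\'
          · subst ha
            have hb : b ≠ c := fun e => hab ⟨rfl, e⟩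
            by_cases hbb : b = '\\'
            · subst hbb
              cases t with
              | nil => simp [rep1, scanEsc, hes, Ne.symm hc]
              | cons d r =>
                have hlr : r.length ≤ n := by simp at hl; omega
                by_cases hd : d = c
                · rw [show rep1 c ('\\' :: d :: r) = c :: rep1 c r from by simp [rep1, hd]]
                  rw [show scanEsc es ('\\' :: c :: rep1 c r) = '\\' :: scanEsc es (c :: rep1 c r) from by
                    simp [scanEsc, hces]]
                  rw [scanEsc_cons_ne es c _ hc, ih r hlr]
                  simp [scanEsc, hes, Ne.symm hc, hd]
                · rw [show rep1 c ('\\' :: d :: r) = '\\' :: rep1 c (d :: r) from by simp [rep1, hd]]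
                  rw [show scanEsc es ('\\' :: '\\' :: rep1 c (d :: r)) =
                        '\\' :: scanEsc es ('\\' :: rep1 c (d :: r)) from by simp [scanEsc, hes]]
                  rw [show ('\\' : Char) :: rep1 c (d :: r) = rep1 c ('\\' :: d :: r) from by
                    simp [rep1, hd]]
                  rw [ih ('\\' :: d :: r) (by simp at hl ⊢; omega)]
                  simp [scanEsc, hes, Ne.symm hc]
            · rw [rep1_cons_ne c b t hbb]
              by_cases hbe : b ∈ es
              · rw [show scanEsc es ('\\' :: b :: rep1 c t) = b :: scanEsc es (rep1 c t) from by
                  simp [scanEsc, hbe]]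
                rw [ih t hlt]
                simp [scanEsc, hbe]
              · rw [show scanEsc es ('\\' :: b :: rep1 c t) =
                      '\\' :: scanEsc es (b :: rep1 c t) from by simp [scanEsc, hbe]]
                rw [← rep1_cons_ne c b t hbb, ih (b :: t) hlbt]
                simp [scanEsc, hbe, hb]
          · rw [scanEsc_cons_ne es a _ ha, ih (b :: t) hlbt]
            rw [show scanEsc (c :: es) (a :: b :: t) = a :: scanEsc (c :: es) (b :: t) from by
              simp [scanEsc, ha]]
  exact fun l => H l.length l le_rfl

lemma scanEsc_nil_id : ∀ l : List Char, scanEsc [] l = l := by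
  intro l
  induction l with
  | nil => rfl
  | cons a t ih =>
    cases t with
    | nil => rfl
    | cons b r => simp_all [scanEsc]

-- the seven passes of A, on lists, equal B's one scan
lemma chain_eq_scan (l : List Char) :
    rep1 '}' (rep1 '{' (rep1 '$' (rep1 '#' (rep1 '_' (rep1 '&' (rep1 '%' l)))))) =
      scanEsc escList l := by
  rw [← scanEsc_nil_id (rep1 '}' (rep1 '{' (rep1 '$' (rep1 '#' (rep1 '_' (rep1 '&' (rep1 '%' l)))))))]
  rw [scan_rep1 '}' [] (by decide) (by decide) (by decide),
      scan_rep1 '{' ['}'] (by decide) (by decide) (by decide),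
      scan_rep1 '$' ['{','}'] (by decide) (by decide) (by decide),
      scan_rep1 '#' ['$','{','}'] (by decide) (by decide) (by decide),
      scan_rep1 '_' ['#','$','{','}'] (by decide) (by decide) (by decide),
      scan_rep1 '&' ['_','#','$','{','}'] (by decide) (by decide) (by decide),
      scan_rep1 '%' ['&','_','#','$','{','}'] (by decide) (by decide) (by decide)]
  rfl

-- ===== VERDICT (by name: the statement is the Claim_ definition above) =====
theorem unescape_latex_spec : Claim_equal_unescape_latex := by
  intro text _
  show unescape_latex text = unescape_latex_alt text
  unfold unescape_latex unescape_latex_alt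
  simp only [PySem.Str.replace, String.toList_ofList]
  apply congrArg
  rw [show ("\\%" : String).toList = ['\\', '%'] from rfl, show ("%" : String).toList = ['%'] from rfl,
      show ("\\&" : String).toList = ['\\', '&'] from rfl, show ("&" : String).toList = ['&'] from rfl,
      show ("\\_" : String).toList = ['\\', '_'] from rfl, show ("_" : String).toList = ['_'] from rfl,
      show ("\\#" : String).toList = ['\\', '#'] from rfl, show ("#" : String).toList = ['#'] from rfl,
      show ("\\$" : String).toList = ['\\', '$'] from rfl, show ("$" : String).toList = ['$'] from rfl,
      show ("\\{" : String).toList = ['\\', '{'] from rfl, show ("{" : String).toList = ['{'] from rfl,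
      show ("\\}" : String).toList = ['\\', '}'] from rfl, show ("}" : String).toList = ['}'] from rfl]
  rw [replace_eq_rep1, replace_eq_rep1, replace_eq_rep1, replace_eq_rep1,
      replace_eq_rep1, replace_eq_rep1, replace_eq_rep1]
  exact chain_eq_scan text.toList
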